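-- pv_equiv track=rewrite | github.com/Siindbad/HackHub-Save-File-Editor | source/core/domain_impl/json/json_raw_edit_guard_service.py | _offset_from_index
-- ===== SOURCE A (Python) =====
-- def _parse_index(index_text: str) -> tuple[int, int]:
--     raw = str(index_text or "1.0").strip()
--     if not raw:
--         return 1, 0
--     parts = raw.split(".", 1)
--     try:
--         line_no = max(1, int(parts[0]))
--     except ValueError:
--         line_no = 1
--     try:
--         col_no = max(0, int(parts[1])) if len(parts) > 1 else 0
--     except ValueError:
--         col_no = 0
--     return line_no, col_no
--
-- def _offset_from_index(raw: str, index_text: str) -> int: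
--     line_no, col_no = _parse_index(index_text)
--     line_start = 0
--     current_line = 1
--     text = str(raw or "")
--     while current_line < line_no and line_start < len(text):
--         next_break = text.find("\n", line_start)
--         if next_break < 0:
--             line_start = len(text)
--             break
--         line_start = next_break + 1
--         current_line += 1
--     return min(len(text), line_start + col_no)
-- ===== SOURCE B (Python) =====
-- def _parse_index(index_text: str) -> tuple[int, int]:
--     raw = str(index_text or "1.0").strip()
--     if not raw:
--         return 1, 0
--     parts = raw.split(".", 1)
--     try:
--         line_no = max(1, int(parts[0]))
--     except ValueError:
--         line_no = 1
--     try: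
--         col_no = max(0, int(parts[1])) if len(parts) > 1 else 0
--     except ValueError:
--         col_no = 0
--     return line_no, col_no
--
-- def _offset_from_index(raw: str, index_text: str) -> int:
--     line_no, col_no = _parse_index(index_text)
--     text = str(raw or "")
--     lines = text.split("\n")
--     if line_no - 1 < len(lines):
--         return min(len(text), sum(len(l) + 1 for l in lines[:line_no - 1]) + col_no)
--     return len(text)
-- ===== Notes on version B (the rewrite author's own statement) =====
-- stated objective: simpler
-- what changed: Replaces A's incremental while-loop of text.find('\n', ...) scans with a split-once-then-prefix-sum decomposition: split the text on newlines and add up len(line)+1 over the lines before the target line, falling back to len(text) when the line number is past the last line.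
import Mathlib
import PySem

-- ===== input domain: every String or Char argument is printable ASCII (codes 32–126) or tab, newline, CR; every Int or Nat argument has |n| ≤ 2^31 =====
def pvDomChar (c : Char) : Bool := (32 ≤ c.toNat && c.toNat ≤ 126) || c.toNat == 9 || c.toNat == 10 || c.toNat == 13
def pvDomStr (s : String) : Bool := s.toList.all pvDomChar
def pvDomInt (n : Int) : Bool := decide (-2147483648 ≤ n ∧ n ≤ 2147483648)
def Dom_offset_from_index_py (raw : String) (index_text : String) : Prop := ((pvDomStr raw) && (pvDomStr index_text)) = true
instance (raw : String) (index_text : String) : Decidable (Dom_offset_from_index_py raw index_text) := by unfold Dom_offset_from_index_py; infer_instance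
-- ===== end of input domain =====

-- B replaces A's incremental find-scan loop with a split-once-then-prefix-sum decomposition (objective: simpler).

-- ===== PORT A =====
-- shared helper: port of _parse_index (both Pythons call the same helper)
def parseIndexPy (index_text : String) : Int × Int :=
  let raw := PySem.Str.strip (if index_text = "" then "1.0" else index_text)
  if raw = "" then (1, 0)
  else
    let parts := (PySem.Str.splitMax? raw "." 1).getD []
    let line_no : Int :=
      match PySem.Int.ofStr? (parts.getD 0 "") with
      | some v => max 1 v
      | none => 1
    let col_no : Int :=
      if 1 < parts.length then
        match PySem.Int.ofStr? (parts.getD 1 "") with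
        | some v => max 0 v
        | none => 0
      else 0
    (line_no, col_no)

-- the while-loop of _offset_from_index, step for step (state: line_start, current_line)
def offsetLineStartA (text : List Char) (line_no : Int) (line_start : Int) (current_line : Int) : Int :=
  if h : current_line < line_no ∧ line_start < (text.length : Int) then
    let next_break := PySem.Chars.findFrom text ['\n'] line_start
    if next_break < 0 then (text.length : Int)
    else offsetLineStartA text line_no (next_break + 1) (current_line + 1)
  else line_start
termination_by (line_no - current_line).toNat
decreasing_by omega

def offset_from_index_py (raw : String) (index_text : String) : Int :=
  let p := parseIndexPy index_text
  let text := raw.toList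
  let line_start := offsetLineStartA text p.1 0 1
  min (text.length : Int) (line_start + p.2)

-- ===== PORT B =====
def offset_from_index_py_alt (raw : String) (index_text : String) : Int :=
  let p := parseIndexPy index_text
  let text := raw.toList
  let lines := PySem.Chars.splitOn text ['\n']
  if p.1 - 1 < (lines.length : Int) then
    min (text.length : Int)
      (((PySem.List.slice lines none (some (p.1 - 1))).map (fun l => (l.length : Int) + 1)).sum + p.2)
  else (text.length : Int)

-- ===== PRECONDITION & SPEC =====
def Spec_offset_from_index_py (raw : String) (index_text : String) (out : Int) : Prop := out = offset_from_index_py_alt raw index_text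
instance (raw : String) (index_text : String) (out : Int) : Decidable (Spec_offset_from_index_py raw index_text out) := by unfold Spec_offset_from_index_py; infer_instance

-- ===== CLAIM (what is proved, stated in full; the proofs are below) =====
def Claim_equal_offset_from_index_py : Prop := ∀ (raw : String) (index_text : String), Dom_offset_from_index_py raw index_text → Spec_offset_from_index_py raw index_text (offset_from_index_py raw index_text)

-- ===== LEMMAS AND PROOFS =====

-- proof-side pure recursion equivalent to Chars.splitOn with a single-char separator
def splitAux (c : Char) : List Char → List Char → List (List Char)
  | [], cur => [cur.reverse]
  | x :: rest, cur => if x = c then cur.reverse :: splitAux c rest [] else splitAux c rest (x :: cur)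

theorem splitAux_ne_nil (c : Char) (l cur : List Char) : splitAux c l cur ≠ [] := by
  induction l generalizing cur with
  | nil => simp [splitAux]
  | cons x rest ih => by_cases h : x = c <;> simp [splitAux, h, ih]

theorem go_eq_splitAux (c : Char) (fuel : Nat) (l cur : List Char) (acc : List (List Char))
    (h : l.length < fuel) :
    PySem.Chars.splitOn.go [c] fuel l cur acc = acc.reverse ++ splitAux c l cur := by
  induction fuel generalizing l cur acc with
  | zero => omega
  | succ fuel ih =>
    cases l with
    | nil => simp [PySem.Chars.splitOn.go, splitAux]
    | cons x rest =>
      rw [PySem.Chars.splitOn.go]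
      by_cases hx : x = c
      · simp only [hx, List.isPrefixOf, List.isPrefixOf_nil_left, Bool.and_true, beq_self_eq_true,
          if_pos, List.length_cons, List.drop_succ_cons, List.drop_zero]
        simp only [List.length_nil, List.drop_zero]
        rw [ih rest [] (cur.reverse :: acc) (by simpa using h)]
        simp [splitAux, hx]
      · have hpre : List.isPrefixOf [c] (x :: rest) = false := by
          simp [List.isPrefixOf, Ne.symm hx]
        simp only [hpre, Bool.false_eq_true, if_false]
        rw [ih rest (x :: cur) acc (by simpa using h)]
        simp [splitAux, hx]

theorem splitOn_eq_splitAux (c : Char) (l : List Char) :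
    PySem.Chars.splitOn l [c] = splitAux c l [] := by
  rw [PySem.Chars.splitOn, go_eq_splitAux c (l.length + 1) l [] [] (by omega)]
  simp

-- proof-side join with separator c (what Python's "\n".join of the split pieces is)
def joinC (c : Char) : List (List Char) → List Char
  | [] => []
  | [l] => l
  | l :: ls => l ++ c :: joinC c ls

theorem joinC_splitAux (c : Char) (l cur : List Char) :
    joinC c (splitAux c l cur) = cur.reverse ++ l := by
  induction l generalizing cur with
  | nil => simp [splitAux, joinC]
  | cons x rest ih =>
    by_cases hx : x = c
    · subst hx
      have hne := splitAux_ne_nil x rest []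
      obtain ⟨p, ps, hps⟩ := List.exists_cons_of_ne_nil hne
      simp only [splitAux, if_true]
      rw [hps]
      have hjoin : joinC x (cur.reverse :: p :: ps) = cur.reverse ++ x :: joinC x (p :: ps) := rfl
      rw [hjoin, ← hps, ih]
      simp
    · simp only [splitAux, if_neg hx]
      rw [ih]
      simp

theorem not_mem_splitAux (c : Char) (l cur : List Char) (hcur : c ∉ cur) :
    ∀ p ∈ splitAux c l cur, c ∉ p := by
  induction l generalizing cur with
  | nil =>
    intro p hp
    simp only [splitAux, List.mem_singleton] at hp
    simpa [hp] using hcur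
  | cons x rest ih =>
    intro p hp
    by_cases hx : x = c
    · subst hx
      simp only [splitAux, if_true, List.mem_cons] at hp
      rcases hp with hp | hp
      · simpa [hp] using hcur
      · exact ih [] (by simp) p hp
    · simp only [splitAux, if_neg hx] at hp
      exact ih (x :: cur) (by simp [hcur, Ne.symm hx]) p hp

theorem find_singleton_of_not_mem (c : Char) (l : List Char) (h : c ∉ l) :
    PySem.Chars.find l [c] = -1 := by
  rw [PySem.Chars.find_eq_neg_one_iff]
  intro hinf
  exact h (List.singleton_sublist.mp hinf.sublist)

theorem find_singleton_append (c : Char) (l rest : List Char) (h : c ∉ l) :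
    PySem.Chars.find (l ++ c :: rest) [c] = (l.length : Int) := by
  have hinf : [c] <:+: l ++ c :: rest := ⟨l, rest, by simp⟩
  have hnn : 0 ≤ PySem.Chars.find (l ++ c :: rest) [c] :=
    (PySem.Chars.find_nonneg_iff _ _).mpr hinf
  obtain ⟨hpref, hmin⟩ := PySem.Chars.find_spec (s := l ++ c :: rest) (sub := [c]) hnn
  set f := (PySem.Chars.find (l ++ c :: rest) [c]).toNat with hf
  have hle : f ≤ l.length := by
    by_contra hgt
    exact hmin l.length (by omega) (by simp [List.drop_append_of_le_length])
  have hne2 : ¬ f < l.length := by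
    intro hlt
    have hc : ((l ++ c :: rest).drop f).head? = some c := by
      rcases hpref with ⟨t, ht⟩
      rw [← ht]
      simp
    rw [List.head?_drop, List.getElem?_append_left hlt] at hc
    exact h (by
      have := List.getElem?_eq_some_iff.mp hc
      rcases this with ⟨hlt2, heq⟩
      exact heq ▸ List.getElem_mem hlt2)
  have : f = l.length := by omega
  omega

-- the loop computes: base if no lines remain to skip; base + Σ(len+1) over the skipped lines; len(text) past the end
theorem loop_spec (ls : List (List Char)) :
    ∀ (text : List Char) (base : Nat) (n cl : Int),
    (∀ p ∈ ls, '\n' ∉ p) → ls ≠ [] → text.drop base = joinC '\n' ls → base ≤ text.length →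
    offsetLineStartA text n (base : Int) cl =
      if n - cl ≤ 0 then (base : Int)
      else if n - cl < (ls.length : Int) then
        (base : Int) + ((ls.take (n - cl).toNat).map (fun p => (p.length : Int) + 1)).sum
      else (text.length : Int) := by
  induction ls with
  | nil => intro _ _ _ _ _ hne; exact absurd rfl hne
  | cons l ls' ih =>
    intro text base n cl hno hne hdrop hble
    rw [offsetLineStartA]
    by_cases hcl : cl < n
    · cases ls' with
      | nil =>
        have hl : text.drop base = l := by simpa [joinC] using hdrop
        have hnl : '\n' ∉ l := hno l (by simp)
        by_cases hbl : (base : Int) < (text.length : Int)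
        · rw [dif_pos ⟨hcl, hbl⟩]
          have hfind : PySem.Chars.find (text.drop base) ['\n'] = -1 := by
            rw [hl]; exact find_singleton_of_not_mem _ _ hnl
          rw [PySem.Chars.findFrom_natCast text ['\n'] base hble, hfind]
          dsimp only
          rw [if_pos rfl, if_pos (by omega : (-1 : Int) < 0)]
          have h1 : ¬ (n - cl ≤ 0) := by omega
          have h2 : ¬ (n - cl < (([l] : List (List Char)).length : Int)) := by simp; omega
          rw [if_neg h1, if_neg h2]
        · rw [dif_neg (by tauto)]
          have hbe : base = text.length := by omega
          have h1 : ¬ (n - cl ≤ 0) := by omega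
          have h2 : ¬ (n - cl < (([l] : List (List Char)).length : Int)) := by simp; omega
          rw [if_neg h1, if_neg h2, hbe]
      | cons l2 ls2 =>
        have hsfx : text.drop base = l ++ '\n' :: joinC '\n' (l2 :: ls2) := by
          simpa [joinC] using hdrop
        have hlen : text.length - base = l.length + 1 + (joinC '\n' (l2 :: ls2)).length := by
          have := congrArg List.length hsfx
          simp only [List.length_drop, List.length_append, List.length_cons] at this
          omega
        have hbl : base < text.length := by omega
        rw [dif_pos ⟨hcl, by exact_mod_cast Nat.cast_lt.mpr hbl⟩]
        have hnl : '\n' ∉ l := hno l (by simp)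
        have hfind : PySem.Chars.find (text.drop base) ['\n'] = (l.length : Int) := by
          rw [hsfx]; exact find_singleton_append _ _ _ hnl
        rw [PySem.Chars.findFrom_natCast text ['\n'] base hble, hfind]
        dsimp only
        rw [if_neg (by omega : ¬ ((l.length : Int) = -1))]
        rw [if_neg (by omega : ¬ ((base : Int) + (l.length : Int) < 0))]
        have hcast : (base : Int) + (l.length : Int) + 1 = ((base + l.length + 1 : Nat) : Int) := by
          push_cast; ring
        rw [hcast]
        have hdrop' : text.drop (base + l.length + 1) = joinC '\n' (l2 :: ls2) := by
          have : text.drop (base + (l.length + 1)) = (text.drop base).drop (l.length + 1) := by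
            rw [List.drop_drop]
          rw [show base + l.length + 1 = base + (l.length + 1) from by omega, this, hsfx]
          simp
        have hble' : base + l.length + 1 ≤ text.length := by omega
        rw [ih text (base + l.length + 1) n (cl + 1) (fun p hp => hno p (by simp [hp]))
          (by simp) hdrop' hble']
        have h1 : ¬ (n - cl ≤ 0) := by omega
        rw [if_neg h1]
        by_cases hc1 : n - (cl + 1) ≤ 0
        · -- n - cl = 1 : target second branch with take 1
          rw [if_pos hc1]
          have hnc : (n - cl).toNat = 1 := by omega
          have h2 : n - cl < ((l :: l2 :: ls2).length : Int) := by simp; omega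
          rw [if_pos h2, hnc]
          simp [List.take_succ_cons]
          push_cast; ring
        · rw [if_neg hc1]
          have hnc : (n - cl).toNat = (n - (cl + 1)).toNat + 1 := by omega
          by_cases hc2 : n - (cl + 1) < ((l2 :: ls2).length : Int)
          · rw [if_pos hc2]
            have h2 : n - cl < ((l :: l2 :: ls2).length : Int) := by
              simp at hc2 ⊢; omega
            rw [if_pos h2, hnc, List.take_succ_cons]
            simp only [List.map_cons, List.sum_cons]
            push_cast; ring
          · rw [if_neg hc2]
            have h2 : ¬ (n - cl < ((l :: l2 :: ls2).length : Int)) := by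
              simp at hc2 ⊢; omega
            rw [if_neg h2]
    · rw [dif_neg (by tauto)]
      rw [if_pos (by omega : n - cl ≤ 0)]

theorem parseIndex_line_ge_one (t : String) : 1 ≤ (parseIndexPy t).1 := by
  unfold parseIndexPy
  generalize PySem.Str.strip (if t = "" then "1.0" else t) = r
  by_cases h : r = ""
  · simp [h]
  · simp only [if_neg h]
    cases hm : PySem.Int.ofStr? (((PySem.Str.splitMax? r "." 1).getD []).getD 0 "") with
    | some v => simp [hm, le_max_left]
    | none => simp [hm]

theorem parseIndex_col_nonneg (t : String) : 0 ≤ (parseIndexPy t).2 := by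
  unfold parseIndexPy
  generalize PySem.Str.strip (if t = "" then "1.0" else t) = r
  by_cases h : r = ""
  · simp [h]
  · simp only [if_neg h]
    by_cases hl : 1 < ((PySem.Str.splitMax? r "." 1).getD []).length
    · cases hm : PySem.Int.ofStr? (((PySem.Str.splitMax? r "." 1).getD []).getD 1 "") with
      | some v => simp [hl, hm, le_max_left]
      | none => simp [hl, hm]
    · simp [hl]

-- ===== VERDICT (by name: the statement is the Claim_ definition above) =====
theorem offset_from_index_py_spec : Claim_equal_offset_from_index_py := by
  intro raw index_text _
  unfold Spec_offset_from_index_py offset_from_index_py offset_from_index_py_alt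
  dsimp only
  have hn1 : 1 ≤ (parseIndexPy index_text).1 := parseIndex_line_ge_one _
  have hc0 : 0 ≤ (parseIndexPy index_text).2 := parseIndex_col_nonneg _
  rw [splitOn_eq_splitAux]
  have hjoin : joinC '\n' (splitAux '\n' raw.toList []) = raw.toList := by
    rw [joinC_splitAux]; simp
  have hno : ∀ q ∈ splitAux '\n' raw.toList [], '\n' ∉ q :=
    not_mem_splitAux _ _ _ (by simp)
  have hne : splitAux '\n' raw.toList [] ≠ [] := splitAux_ne_nil _ _ _
  have hlpos : 1 ≤ (splitAux '\n' raw.toList []).length := List.length_pos_of_ne_nil hne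
  have h0 : raw.toList.drop 0 = joinC '\n' (splitAux '\n' raw.toList []) := by simp [hjoin]
  have hloop := loop_spec (splitAux '\n' raw.toList []) raw.toList 0 (parseIndexPy index_text).1 1
    hno hne h0 (by omega)
  push_cast at hloop
  rw [hloop]
  rw [PySem.List.slice_to _ (by omega : (0:Int) ≤ (parseIndexPy index_text).1 - 1)]
  by_cases hA : (parseIndexPy index_text).1 - 1 ≤ 0
  · have hA0 : (parseIndexPy index_text).1 - 1 = 0 := by omega
    rw [if_pos hA, if_pos (by push_cast; omega :
      (parseIndexPy index_text).1 - 1 < ((splitAux '\n' raw.toList []).length : Int))]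
    rw [hA0]
    simp
  · rw [if_neg hA]
    by_cases hB : (parseIndexPy index_text).1 - 1 < ((splitAux '\n' raw.toList []).length : Int)
    · rw [if_pos hB, if_pos (by push_cast at hB ⊢; omega :
        (parseIndexPy index_text).1 - 1 < ((splitAux '\n' raw.toList []).length : Int))]
      norm_num
    · rw [if_neg hB, if_neg (by push_cast at hB ⊢; omega :
        ¬ ((parseIndexPy index_text).1 - 1 < ((splitAux '\n' raw.toList []).length : Int)))]
      have := hc0
      omega
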